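-- pv_equiv track=rewrite | github.com/fpemud/fpemud-refsystem | lib/fm_util.py | portageGetPkgNameFromPkgAtom
-- ===== SOURCE A (Python) =====
-- def portageGetPkgNameFromPkgAtom(pkgAtom):
--     pkgName = pkgAtom
--
--     while pkgName[0] in ["<", ">", "=", "!", "~"]:
--         pkgName = pkgName[1:]
--
--     i = 0
--     while i < len(pkgName):
--         if pkgName[i] == "-" and i < len(pkgName) - 1 and pkgName[i + 1].isdigit():
--             pkgName = pkgName[:i]
--             break
--         i = i + 1
--
--     return pkgName
-- ===== SOURCE B (Python) =====
-- def portageGetPkgNameFromPkgAtom(pkgAtom):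
--     # Strip version operators, then walk hyphen-delimited tokens:
--     # the name ends right before the first token that starts with a digit.
--     pkgName = pkgAtom.lstrip("<>=!~")
--     parts = pkgName.split('-')
--     result = [parts[0]]
--     for part in parts[1:]:
--         if part and part[0].isdigit():
--             break
--         result.append(part)
--     return '-'.join(result)
-- ===== Notes on version B (the rewrite author's own statement) =====
-- stated objective: faster
-- what changed: B strips the operator prefix with one lstrip call and finds the name/version boundary by splitting on '-' and collecting hyphen tokens until one starts with a digit, replacing A's two character-index while-loops (whose strip loop re-slices the string per operator character).
-- crash fix: On inputs consisting entirely of the operator characters <>=!~ (including the empty string) A raises IndexError on pkgName[0]; B returns ''. — e.g. on portageGetPkgNameFromPkgAtom(">="): A raises IndexError, B returns ""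
import Mathlib
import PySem

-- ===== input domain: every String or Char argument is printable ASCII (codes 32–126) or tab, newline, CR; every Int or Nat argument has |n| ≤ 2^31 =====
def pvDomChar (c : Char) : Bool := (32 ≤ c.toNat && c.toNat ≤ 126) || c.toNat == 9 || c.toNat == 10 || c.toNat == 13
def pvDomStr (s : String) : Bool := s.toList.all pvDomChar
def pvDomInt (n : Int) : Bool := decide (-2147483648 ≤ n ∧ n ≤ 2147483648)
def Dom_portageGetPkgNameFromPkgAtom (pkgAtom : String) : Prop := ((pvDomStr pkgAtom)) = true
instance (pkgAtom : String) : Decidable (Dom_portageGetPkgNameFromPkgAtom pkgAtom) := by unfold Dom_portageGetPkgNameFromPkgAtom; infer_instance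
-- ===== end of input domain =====

-- B strips the operator prefix and finds the name/version boundary by splitting on '-'
-- and collecting hyphen tokens until one starts with a digit, replacing A's two
-- character-index loops (measured faster); where A raises IndexError (all-operator input) B returns "".


-- ===== PORT A =====
-- the operator characters "<", ">", "=", "!", "~"
def pvOpsA : List Char := ['<', '>', '=', '!', '~']

-- A's first while-loop: `while pkgName[0] in [...]: pkgName = pkgName[1:]`;
-- none = IndexError on pkgName[0] when the string runs empty.
def pvAStrip : List Char → Option (List Char)
  | [] => none
  | c :: rest => if c ∈ pvOpsA then pvAStrip rest else some (c :: rest)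

-- A's second while-loop: scan left to right, truncate (pkgName[:i]) at the first
-- '-' that is not last and is followed by a digit.
def pvAScan : List Char → List Char
  | [] => []
  | c :: rest =>
      if c == '-' && (match rest with | [] => false | d :: _ => PySem.Chars.isdigit d)
      then []
      else c :: pvAScan rest

def portageGetPkgNameFromPkgAtom (pkgAtom : String) : String :=
  match pvAStrip pkgAtom.toList with
  | none => ""          -- Python raises IndexError here; excluded by Pre_
  | some l => String.ofList (pvAScan l)

-- ===== PORT B =====
-- `part and part[0].isdigit()`
def pvStartsDigit (p : List Char) : Bool :=
  match p with | [] => false | c :: _ => PySem.Chars.isdigit c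

-- B's for-loop over parts[1:]: keep appending parts until one starts with a digit
def pvBTake : List (List Char) → List (List Char)
  | [] => []
  | p :: rest => if pvStartsDigit p then [] else p :: pvBTake rest

def portageGetPkgNameFromPkgAtom_alt (pkgAtom : String) : String :=
  -- pkgAtom.lstrip("<>=!~")  (library call, ported as dropWhile; exact on ASCII)
  let cs := pkgAtom.toList.dropWhile (fun c => c ∈ pvOpsA)
  -- pkgName.split('-')  (library call, ported as List.splitOn; exact for this 1-char sep)
  match cs.splitOn '-' with
  | [] => ""            -- unreachable: splitOn never returns []
  | p0 :: rest => String.ofList (PySem.Chars.join ['-'] (p0 :: pvBTake rest))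

-- ===== PRECONDITION & SPEC =====
-- Pre_ excludes exactly the inputs on which A raises IndexError: strings (incl. "")
-- all of whose characters are the operator characters <>=!~.
def Pre_portageGetPkgNameFromPkgAtom (pkgAtom : String) : Prop :=
  ¬ (pkgAtom.toList.all (fun c => ['<', '>', '=', '!', '~'].contains c) = true)
instance (pkgAtom : String) : Decidable (Pre_portageGetPkgNameFromPkgAtom pkgAtom) := by
  unfold Pre_portageGetPkgNameFromPkgAtom; infer_instance

def pvWitness_portageGetPkgNameFromPkgAtom : String := ">=app-misc/foo-1.2"

-- On inputs consisting entirely of the operator characters <>=!~ (including the empty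
-- string) A raises IndexError on pkgName[0]; B returns ''.
def Raises_portageGetPkgNameFromPkgAtom (pkgAtom : String) : Prop :=
  pkgAtom.toList.all (fun c => ['<', '>', '=', '!', '~'].contains c) = true
instance (pkgAtom : String) : Decidable (Raises_portageGetPkgNameFromPkgAtom pkgAtom) := by
  unfold Raises_portageGetPkgNameFromPkgAtom; infer_instance

def pvRaiseWitness_portageGetPkgNameFromPkgAtom : String := ">="
def pvRaiseWitnessOut_portageGetPkgNameFromPkgAtom : String := ""

def Spec_portageGetPkgNameFromPkgAtom (pkgAtom : String) (out : String) : Prop :=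
  out = portageGetPkgNameFromPkgAtom_alt pkgAtom
instance (pkgAtom : String) (out : String) : Decidable (Spec_portageGetPkgNameFromPkgAtom pkgAtom out) := by
  unfold Spec_portageGetPkgNameFromPkgAtom; infer_instance

-- ===== CLAIM (what is proved, stated in full; the proofs are below) =====
def Claim_equal_portageGetPkgNameFromPkgAtom : Prop :=
  ∀ (pkgAtom : String), Dom_portageGetPkgNameFromPkgAtom pkgAtom →
    Pre_portageGetPkgNameFromPkgAtom pkgAtom →
    Spec_portageGetPkgNameFromPkgAtom pkgAtom (portageGetPkgNameFromPkgAtom pkgAtom)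

def Claim_raises_portageGetPkgNameFromPkgAtom : Prop :=
  (∀ (pkgAtom : String), Dom_portageGetPkgNameFromPkgAtom pkgAtom →
     Raises_portageGetPkgNameFromPkgAtom pkgAtom → ¬ Pre_portageGetPkgNameFromPkgAtom pkgAtom) ∧
  (Dom_portageGetPkgNameFromPkgAtom (pvRaiseWitness_portageGetPkgNameFromPkgAtom) ∧
   Raises_portageGetPkgNameFromPkgAtom (pvRaiseWitness_portageGetPkgNameFromPkgAtom) ∧
   portageGetPkgNameFromPkgAtom_alt (pvRaiseWitness_portageGetPkgNameFromPkgAtom) =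
     pvRaiseWitnessOut_portageGetPkgNameFromPkgAtom)

-- ===== LEMMAS AND PROOFS =====

-- A's strip loop agrees with dropWhile as soon as some char is not an operator
lemma pvAStrip_eq_dropWhile (cs : List Char)
    (h : ¬ (cs.all (fun c => ['<', '>', '=', '!', '~'].contains c) = true)) :
    pvAStrip cs = some (cs.dropWhile (fun c => c ∈ pvOpsA)) := by
  induction cs with
  | nil => simp at h
  | cons c rest ih =>
      by_cases hc : c ∈ pvOpsA
      · have hc' : ['<', '>', '=', '!', '~'].contains c = true := by
          simpa [pvOpsA, List.contains_iff_mem] using hc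
        simp only [pvAStrip, List.dropWhile, hc, if_pos, List.all_cons, hc', Bool.true_and] at *
        exact ih h
      · simp [pvAStrip, List.dropWhile, hc]

lemma join_cons_head (c : Char) (q : List Char) (l : List (List Char)) :
    PySem.Chars.join ['-'] ((c :: q) :: l) = c :: PySem.Chars.join ['-'] (q :: l) := by
  cases l with
  | nil => simp [PySem.Chars.join_singleton]
  | cons b l' => simp [PySem.Chars.join_cons_cons]

lemma join_nil_head (q : List Char) (l : List (List Char)) :
    PySem.Chars.join ['-'] ([] :: q :: l) = '-' :: PySem.Chars.join ['-'] (q :: l) := by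
  simp [PySem.Chars.join_cons_cons]

lemma isdigit_ne_dash {d : Char} (h : PySem.Chars.isdigit d = true) : (d == '-') = false := by
  by_cases hd : d = '-'
  · subst hd; simp [PySem.Chars.isdigit] at h
  · simpa using hd

-- the central fact: B's split-and-collect computes exactly A's character scan
lemma pvB_eq_pvAScan : ∀ (cs : List Char) (p0 : List Char) (rest : List (List Char)),
    cs.splitOn '-' = p0 :: rest →
    PySem.Chars.join ['-'] (p0 :: pvBTake rest) = pvAScan cs := by
  intro cs
  induction cs with
  | nil =>
      intro p0 rest h
      simp [List.splitOn, List.splitOnP_nil] at h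
      obtain ⟨h1, h2⟩ := h
      subst h1; subst h2
      simp [pvBTake, pvAScan, PySem.Chars.join_singleton]
  | cons c cs ih =>
      intro p0 rest h
      by_cases hc : c = '-'
      · subst hc
        rw [List.splitOn, List.splitOnP_cons] at h
        simp only [BEq.rfl, if_pos] at h
        obtain ⟨h1, h2⟩ := List.cons.inj h
        subst h1
        cases cs with
        | nil =>
            simp [List.splitOnP_nil] at h2
            subst h2
            simp [pvBTake, pvStartsDigit, pvAScan, PySem.Chars.join_cons_cons,
              PySem.Chars.join_singleton]
        | cons d cs' =>
            by_cases hd : PySem.Chars.isdigit d = true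
            · -- the next token starts with a digit: both sides truncate here
              have hdd : (d == '-') = false := isdigit_ne_dash hd
              rw [List.splitOnP_cons, hdd] at h2
              simp only [if_neg Bool.false_ne_true] at h2
              obtain ⟨q0, qrest, hq⟩ :=
                List.exists_cons_of_ne_nil (List.splitOnP_ne_nil (fun x => x == '-') cs')
              rw [hq] at h2
              simp only [List.modifyHead] at h2
              subst h2
              simp [pvBTake, pvStartsDigit, hd, pvAScan, PySem.Chars.join_singleton]
            · -- next token does not start with a digit: both sides keep '-' and recurse
              obtain ⟨q0, qrest, hq⟩ :=
                List.exists_cons_of_ne_nil (List.splitOnP_ne_nil (fun x => x == '-') (d :: cs'))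
              have hq' : (d :: cs').splitOn '-' = q0 :: qrest := by
                simpa [List.splitOn] using hq
              rw [hq] at h2
              subst h2
              have hq0 : pvStartsDigit q0 = false := by
                rw [List.splitOnP_cons] at hq
                by_cases hdm : (d == '-') = true
                · rw [hdm] at hq
                  simp only [if_pos] at hq
                  obtain ⟨e1, _⟩ := List.cons.inj hq
                  subst e1; simp [pvStartsDigit]
                · rw [Bool.eq_false_iff.mpr hdm] at hq
                  simp only [if_neg Bool.false_ne_true] at hq
                  obtain ⟨r0, rr, hr⟩ :=
                    List.exists_cons_of_ne_nil (List.splitOnP_ne_nil (fun x => x == '-') cs')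
                  rw [hr] at hq
                  simp only [List.modifyHead] at hq
                  obtain ⟨e1, _⟩ := List.cons.inj hq
                  subst e1
                  simp [pvStartsDigit, Bool.eq_false_iff.mp (Bool.not_eq_true _ ▸ hd)]
              rw [show pvBTake (q0 :: qrest) = q0 :: pvBTake qrest by simp [pvBTake, hq0]]
              rw [join_nil_head, ih q0 qrest hq']
              simp [pvAScan, Bool.eq_false_iff.mp (Bool.not_eq_true _ ▸ hd)]
      · -- c ≠ '-': both sides keep c and recurse
        rw [List.splitOn, List.splitOnP_cons] at h
        have hcb : (c == '-') = false := by simpa using hc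
        rw [hcb] at h
        simp only [if_neg Bool.false_ne_true] at h
        obtain ⟨q0, qrest, hq⟩ :=
          List.exists_cons_of_ne_nil (List.splitOnP_ne_nil (fun x => x == '-') cs)
        have hq' : cs.splitOn '-' = q0 :: qrest := by simpa [List.splitOn] using hq
        rw [hq] at h
        simp only [List.modifyHead] at h
        obtain ⟨h1, h2⟩ := List.cons.inj h
        subst h1; subst h2
        rw [join_cons_head, ih q0 qrest hq']
        simp [pvAScan, hcb]

-- ===== VERDICT (by name: the statement is the Claim_ definition above) =====
theorem portageGetPkgNameFromPkgAtom_spec : Claim_equal_portageGetPkgNameFromPkgAtom := by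
  intro pkgAtom _ hpre
  unfold Spec_portageGetPkgNameFromPkgAtom portageGetPkgNameFromPkgAtom portageGetPkgNameFromPkgAtom_alt
  unfold Pre_portageGetPkgNameFromPkgAtom at hpre
  rw [pvAStrip_eq_dropWhile _ hpre]
  have hne : (pkgAtom.toList.dropWhile (fun c => c ∈ pvOpsA)).splitOn '-' ≠ [] := by
    intro h
    exact List.splitOnP_ne_nil (fun x => x == '-')
      (pkgAtom.toList.dropWhile (fun c => c ∈ pvOpsA)) (by simpa [List.splitOn] using h)
  obtain ⟨p0, rest, hq⟩ := List.exists_cons_of_ne_nil hne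
  simp only [hq]
  rw [pvB_eq_pvAScan _ _ _ hq]

@[simp]
theorem portageGetPkgNameFromPkgAtom_raises : Claim_raises_portageGetPkgNameFromPkgAtom := by
  unfold Claim_raises_portageGetPkgNameFromPkgAtom
  exact ⟨fun pkgAtom _ hr hp => hp hr, by decide⟩
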